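-- pv_equiv track=rewrite | github.com/joswha/interviewpreparation | cracking-coding-interview/Algorithms/RecursionDP/8.py | permWithDups
-- ===== SOURCE A (Python) =====
-- def permWithDups(string):
--     res = []
--     if not string:
--         res.append(string)
--     else:
--         a = string[0]
--         b = string[1:]
--         for elem in permWithDups(b):
--             res.append(elem)
--             r = a + elem
--             res.append(r)
--             r = elem + a
--             res.append(r)
--
--     good = []
--     for elem in res:
--         if elem not in good:
--             good.append(elem)
--
--     return good
-- ===== SOURCE B (Python) =====
-- def permWithDups(string):
--     cur = ['']
--     for a in reversed(string):
--         nxt = []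
--         for elem in cur:
--             for cand in (elem, a + elem, elem + a):
--                 if cand not in nxt:
--                     nxt.append(cand)
--         cur = nxt
--     return cur
-- ===== Notes on version B (the rewrite author's own statement) =====
-- stated objective: alternative
-- what changed: Replaced A's linear tail-recursion with separate build-then-dedup passes per level by an iterative fold over the characters from last to first that dedups inline while inserting each candidate.
import Mathlib
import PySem

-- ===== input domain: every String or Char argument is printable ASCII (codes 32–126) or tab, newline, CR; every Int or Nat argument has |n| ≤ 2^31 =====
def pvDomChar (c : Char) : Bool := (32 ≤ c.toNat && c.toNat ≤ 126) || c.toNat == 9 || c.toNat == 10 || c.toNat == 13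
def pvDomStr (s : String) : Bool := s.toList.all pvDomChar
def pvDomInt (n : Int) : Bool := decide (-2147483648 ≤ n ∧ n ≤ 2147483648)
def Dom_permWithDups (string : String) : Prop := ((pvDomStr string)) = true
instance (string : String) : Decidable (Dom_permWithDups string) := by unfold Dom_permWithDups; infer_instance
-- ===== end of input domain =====

-- ===== PORT A =====
-- B changes the decomposition: A's linear tail-recursion with a build-then-dedup pass per level
-- becomes an iterative fold over the characters (last to first) that dedups while inserting (objective: alternative).
-- Strings are handled as List Char (PySem convention); the wrappers map String.ofList at the end.
def pvDedupStep (good : List (List Char)) (elem : List Char) : List (List Char) :=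
  if elem ∈ good then good else good ++ [elem]

def permCoreA : List Char → List (List Char)
  | [] =>
      let res : List (List Char) := [[]]
      res.foldl pvDedupStep []
  | a :: b =>
      let res := (permCoreA b).foldl (fun r elem => r ++ [elem, a :: elem, elem ++ [a]]) []
      res.foldl pvDedupStep []

def permWithDups (string : String) : List String :=
  (permCoreA string.toList).map String.ofList

-- ===== PORT B =====
def pvStepB (a : Char) (cur : List (List Char)) : List (List Char) :=
  cur.foldl (fun nxt elem =>
    [elem, a :: elem, elem ++ [a]].foldl
      (fun nxt cand => if cand ∈ nxt then nxt else nxt ++ [cand]) nxt) []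

def permWithDups_alt (string : String) : List String :=
  (string.toList.reverse.foldl (fun cur a => pvStepB a cur) [[]]).map String.ofList

-- ===== PRECONDITION & SPEC =====
def Spec_permWithDups (string : String) (out : List String) : Prop := out = permWithDups_alt string
instance (string : String) (out : List String) : Decidable (Spec_permWithDups string out) := by unfold Spec_permWithDups; infer_instance

-- ===== CLAIM (what is proved, stated in full; the proofs are below) =====
def Claim_equal_permWithDups : Prop := ∀ (string : String), Dom_permWithDups string → Spec_permWithDups string (permWithDups string)

-- ===== LEMMAS AND PROOFS =====
-- folding the dedup step over a flatMap = folding the inner lists one after another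
theorem pvFoldl_flatMap {α β γ : Type} (g : γ → β → γ) (f : α → List β) (L : List α) (init : γ) :
    (L.flatMap f).foldl g init = L.foldl (fun b e => (f e).foldl g b) init := by
  induction L generalizing init with
  | nil => rfl
  | cons x xs ih => simp [List.flatMap_cons, List.foldl_append, ih]

-- A's res-building loop is a flatMap
theorem pvRes_eq_flatMap (a : Char) (L : List (List Char)) :
    L.foldl (fun r elem => r ++ [elem, a :: elem, elem ++ [a]]) [] =
      L.flatMap (fun elem => [elem, a :: elem, elem ++ [a]]) := by
  simpa using PySem.List.foldl_append_eq_flatMap (fun elem => [elem, a :: elem, elem ++ [a]]) L []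

theorem pvCore_eq (cs : List Char) :
    permCoreA cs = cs.foldr (fun a cur => pvStepB a cur) [[]] := by
  induction cs with
  | nil => rfl
  | cons a b ih =>
      show (((permCoreA b).foldl (fun r elem => r ++ [elem, a :: elem, elem ++ [a]]) []).foldl
              pvDedupStep []) = pvStepB a (b.foldr (fun a cur => pvStepB a cur) [[]])
      rw [← ih, pvRes_eq_flatMap, pvFoldl_flatMap]
      rfl

-- ===== VERDICT (by name: the statement is the Claim_ definition above) =====
theorem permWithDups_spec : Claim_equal_permWithDups := by
  intro s _
  show permWithDups s = permWithDups_alt s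
  unfold permWithDups permWithDups_alt
  rw [List.foldl_reverse, pvCore_eq]
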